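-- pv_equiv track=rewrite | github.com/ariecattan/coref | utils.py | separate_docs_into_topics
-- ===== SOURCE A (Python) =====
-- def separate_docs_into_topics(texts, subtopic=False):
--     text_by_topics = {}
--     for k, v in texts.items():
--         topic_key = k.split('_')[0]
--         if subtopic:
--             topic_key += '_{}'.format(1 if 'plus' in k else 0)
--         if topic_key not in text_by_topics:
--             text_by_topics[topic_key] = {}
--         text_by_topics[topic_key][k] = v
--
--     return text_by_topics
-- ===== SOURCE B (Python) =====
-- def separate_docs_into_topics(texts, subtopic=False):
--     def topic_of(k):
--         t = k.split('_')[0]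
--         if subtopic:
--             t += '_{}'.format(1 if 'plus' in k else 0)
--         return t
--
--     tagged = [(topic_of(k), k, v) for k, v in texts.items()]
--     order = list(dict.fromkeys(t for t, _, _ in tagged))
--     return {t: {k: v for t2, k, v in tagged if t2 == t} for t in order}
-- ===== Notes on version B (the rewrite author's own statement) =====
-- stated objective: alternative
-- what changed: Replaces the incremental dict-of-dicts construction with a pipeline: tag every item with its topic key once, dedup the topic keys in first-occurrence order, then build each topic's inner dict by a comprehension filtering the tagged list.
import Mathlib
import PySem

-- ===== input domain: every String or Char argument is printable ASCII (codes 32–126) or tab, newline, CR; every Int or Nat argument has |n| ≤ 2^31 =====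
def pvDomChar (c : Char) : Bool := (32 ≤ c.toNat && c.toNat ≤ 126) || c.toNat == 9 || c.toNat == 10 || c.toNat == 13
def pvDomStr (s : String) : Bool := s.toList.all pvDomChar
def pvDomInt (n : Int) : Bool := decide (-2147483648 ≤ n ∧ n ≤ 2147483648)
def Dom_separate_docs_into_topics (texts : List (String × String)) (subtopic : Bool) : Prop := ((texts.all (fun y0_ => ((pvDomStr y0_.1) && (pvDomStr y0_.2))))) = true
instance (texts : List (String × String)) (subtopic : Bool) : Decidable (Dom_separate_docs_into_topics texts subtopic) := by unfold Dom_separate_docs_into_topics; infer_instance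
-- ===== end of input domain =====

-- B replaces A's incremental dict-of-dicts construction by a tag/dedup/filter pipeline (alternative decomposition, same cost class).

-- ===== PORT A =====
-- k.split('_')[0]: '_' is a nonempty separator, so the split list is nonempty and [0] is its head
def separate_docs_into_topics (texts : List (String × String)) (subtopic : Bool) : List (String × List (String × String)) :=
  ((texts.foldl (fun (d : PySem.Dict String (PySem.Dict String String)) kv =>
      let tk0 := ((PySem.Str.split? kv.1 "_").getD []).headD ""
      let tk := if subtopic then tk0 ++ (if PySem.Str.isIn "plus" kv.1 then "_1" else "_0") else tk0
      let d' := if d.contains tk then d else d.insert tk PySem.Dict.empty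
      d'.insert tk ((d'.getD tk PySem.Dict.empty).insert kv.1 kv.2))
    PySem.Dict.empty).items).map (fun p => (p.1, p.2.items))

-- ===== PORT B =====
def pvTopicOf (subtopic : Bool) (k : String) : String :=
  let t := ((PySem.Str.split? k "_").getD []).headD ""
  if subtopic then t ++ (if PySem.Str.isIn "plus" k then "_1" else "_0") else t

def separate_docs_into_topics_alt (texts : List (String × String)) (subtopic : Bool) : List (String × List (String × String)) :=
  let tagged := texts.map (fun kv => (pvTopicOf subtopic kv.1, kv.1, kv.2))
  let order := PySem.List.dedup (tagged.map (fun x => x.1))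
  order.map (fun t => (t,
    ((tagged.filter (fun x => x.1 == t)).foldl
      (fun (d : PySem.Dict String String) x => d.insert x.2.1 x.2.2) PySem.Dict.empty).items))

-- ===== PRECONDITION & SPEC =====
def Spec_separate_docs_into_topics (texts : List (String × String)) (subtopic : Bool) (out : List (String × List (String × String))) : Prop := out = separate_docs_into_topics_alt texts subtopic
instance (texts : List (String × String)) (subtopic : Bool) (out : List (String × List (String × String))) : Decidable (Spec_separate_docs_into_topics texts subtopic out) := by unfold Spec_separate_docs_into_topics; infer_instance

-- ===== CLAIM (what is proved, stated in full; the proofs are below) =====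
def Claim_equal_separate_docs_into_topics : Prop := ∀ (texts : List (String × String)) (subtopic : Bool), Dom_separate_docs_into_topics texts subtopic → Spec_separate_docs_into_topics texts subtopic (separate_docs_into_topics texts subtopic)

-- ===== LEMMAS AND PROOFS =====

-- A's loop body, with the topic function abstracted
def pvStepA (T : String → String) (d : PySem.Dict String (PySem.Dict String String))
    (kv : String × String) : PySem.Dict String (PySem.Dict String String) :=
  let tk := T kv.1
  let d' := if d.contains tk then d else d.insert tk PySem.Dict.empty
  d'.insert tk ((d'.getD tk PySem.Dict.empty).insert kv.1 kv.2)

-- the inner dict collected for one topic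
def pvInner (T : String → String) (xs : List (String × String)) (t : String) : PySem.Dict String String :=
  (xs.filter (fun kv => T kv.1 == t)).foldl (fun d kv => d.insert kv.1 kv.2) PySem.Dict.empty

theorem pvStepA_eq (T : String → String) (d : PySem.Dict String (PySem.Dict String String))
    (kv : String × String) :
    pvStepA T d kv = d.insert (T kv.1) ((d.getD (T kv.1) PySem.Dict.empty).insert kv.1 kv.2) := by
  unfold pvStepA
  by_cases h : d.contains (T kv.1)
  · simp [h]
  · simp [h, PySem.Dict.getD_insert_self, PySem.Dict.insert_insert_self,
      PySem.Dict.getD_of_not_contains _ _ (by simpa using h)]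

theorem pv_get?_mk_map {ν : Type} (g : String → ν) (D : List String) (hD : D.Nodup) (t : String) :
    (PySem.Dict.mk (D.map (fun s => (s, g s)))).get? t = if t ∈ D then some (g t) else none := by
  induction D with
  | nil => simp [PySem.Dict.get?]
  | cons a D ih =>
    simp only [List.map_cons, PySem.Dict.get?_mk_cons]
    rcases List.nodup_cons.mp hD with ⟨ha, hD'⟩
    by_cases h : a = t
    · subst h; simp
    · simp only [beq_iff_eq, if_neg h, ih hD', List.mem_cons]
      by_cases ht : t ∈ D <;> simp [ht, Ne.symm h, h]

theorem pv_dedup_snoc {α : Type} [DecidableEq α] (l : List α) (a : α) :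
    PySem.List.dedup (l ++ [a]) = if a ∈ l then PySem.List.dedup l else PySem.List.dedup l ++ [a] := by
  have h1 : ∀ (m : List α), PySem.List.dedup m = PySem.Set.ofList m := by
    intro m; simp [PySem.List.dedup_eq_ofList]
  rw [h1, h1, PySem.Set.ofList_eq_foldl, PySem.Set.ofList_eq_foldl, List.foldl_append]
  simp only [List.foldl_cons, List.foldl_nil]
  rw [← PySem.Set.ofList_eq_foldl]
  unfold PySem.Set.add
  by_cases h : a ∈ l
  · simp [(PySem.Set.contains_iff _ _).2 (by simpa [PySem.Set.mem_ofList] using h)]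
  · have : PySem.Set.contains (PySem.Set.ofList l) a = false := by
      rw [← Bool.not_eq_true]
      intro hc
      exact h (by simpa [PySem.Set.mem_ofList] using (PySem.Set.contains_iff _ _).1 hc)
    simp [this, h]

theorem pvInner_snoc (T : String → String) (xs : List (String × String)) (x : String × String) (t : String) :
    pvInner T (xs ++ [x]) t =
      if T x.1 = t then (pvInner T xs t).insert x.1 x.2 else pvInner T xs t := by
  unfold pvInner
  rw [List.filter_append]
  by_cases h : T x.1 = t
  · simp [h, List.foldl_append]
  · simp [h, List.foldl_append]

-- main invariant: A's fold is the dict keyed by the deduped topics, each mapped to its collected inner dict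
theorem pv_key (T : String → String) (xs : List (String × String)) :
    xs.foldl (pvStepA T) PySem.Dict.empty =
      PySem.Dict.mk ((PySem.List.dedup (xs.map (fun kv => T kv.1))).map (fun t => (t, pvInner T xs t))) := by
  induction xs using List.reverseRecOn with
  | nil => simp [PySem.List.dedup, PySem.Dict.empty]
  | append_singleton xs x ih =>
    rw [List.foldl_append, List.foldl_cons, List.foldl_nil, ih, pvStepA_eq]
    set t0 := T x.1 with ht0
    set D := PySem.List.dedup (xs.map (fun kv => T kv.1)) with hDdef
    have hDnd : D.Nodup := PySem.List.nodup_dedup _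
    have hget := pv_get?_mk_map (fun t => pvInner T xs t) D hDnd t0
    have hdd : PySem.List.dedup ((xs ++ [x]).map (fun kv => T kv.1)) =
        if t0 ∈ D then D else D ++ [t0] := by
      rw [List.map_append, List.map_singleton, pv_dedup_snoc]
      have hiff : t0 ∈ D ↔ t0 ∈ xs.map (fun kv => T kv.1) := by
        rw [hDdef]; exact PySem.List.mem_dedup _ _
      by_cases hm : t0 ∈ xs.map (fun kv => T kv.1)
      · rw [if_pos hm, if_pos (hiff.2 hm)]
      · rw [if_neg hm, if_neg (fun hc => hm (hiff.1 hc))]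
    by_cases hmem : t0 ∈ D
    · -- topic already present: overwrite in place
      have hcont : (PySem.Dict.mk (D.map (fun t => (t, pvInner T xs t)))).contains t0 = true := by
        rw [PySem.Dict.contains_eq_isSome_get?, hget]; simp [hmem]
      have hgd : (PySem.Dict.mk (D.map (fun t => (t, pvInner T xs t)))).getD t0 PySem.Dict.empty
          = pvInner T xs t0 := by
        rw [PySem.Dict.getD_eq_get?_getD, hget]; simp [hmem]
      apply PySem.Dict.ext
      rw [PySem.Dict.items_insert_of_contains _ _ hcont, hgd, hdd, if_pos hmem]
      simp only [PySem.Dict.items, List.map_map]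
      apply List.map_congr_left
      intro t _
      by_cases h : t = t0
      · subst h; simp [pvInner_snoc, ht0]
      · have hne : T x.1 ≠ t := by intro hc; exact h hc.symm
        simp [Function.comp, h, Ne.symm h, pvInner_snoc, hne]
    · -- new topic: appended at the end, its collected inner dict starts empty
      have hcont : (PySem.Dict.mk (D.map (fun t => (t, pvInner T xs t)))).contains t0 = false := by
        rw [PySem.Dict.contains_eq_isSome_get?, hget]; simp [hmem]
      have hgd : (PySem.Dict.mk (D.map (fun t => (t, pvInner T xs t)))).getD t0 PySem.Dict.empty
          = PySem.Dict.empty := PySem.Dict.getD_of_not_contains _ _ hcont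
      have hne : ¬ t0 ∈ xs.map (fun kv => T kv.1) := fun hc => hmem ((PySem.List.mem_dedup _ _).2 hc)
      have hinner0 : pvInner T xs t0 = PySem.Dict.empty := by
        unfold pvInner
        have : xs.filter (fun kv => T kv.1 == t0) = [] := by
          apply List.filter_eq_nil_iff.2
          intro kv hkv hbe
          exact hne (List.mem_map.2 ⟨kv, hkv, by simpa using hbe⟩)
        simp [this]
      apply PySem.Dict.ext
      rw [PySem.Dict.items_insert_of_not_contains _ _ hcont, hgd, hdd, if_neg hmem]
      simp only [PySem.Dict.items, List.map_append, List.map_singleton]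
      congr 1
      · apply List.map_congr_left
        intro t htD
        have h : t ≠ t0 := fun hc => hmem (hc ▸ htD)
        have hne : T x.1 ≠ t := by intro hc; exact h hc.symm
        simp [pvInner_snoc, hne]
      · simp [pvInner_snoc, ← ht0, hinner0]

-- ===== VERDICT (by name: the statement is the Claim_ definition above) =====
theorem separate_docs_into_topics_spec : Claim_equal_separate_docs_into_topics := by
  intro texts subtopic _
  unfold Spec_separate_docs_into_topics separate_docs_into_topics separate_docs_into_topics_alt
  have hfold : texts.foldl (fun (d : PySem.Dict String (PySem.Dict String String)) kv =>
      let tk0 := ((PySem.Str.split? kv.1 "_").getD []).headD ""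
      let tk := if subtopic then tk0 ++ (if PySem.Str.isIn "plus" kv.1 then "_1" else "_0") else tk0
      let d' := if d.contains tk then d else d.insert tk PySem.Dict.empty
      d'.insert tk ((d'.getD tk PySem.Dict.empty).insert kv.1 kv.2)) PySem.Dict.empty
      = texts.foldl (pvStepA (pvTopicOf subtopic)) PySem.Dict.empty := rfl
  rw [hfold, pv_key]
  simp only [PySem.Dict.items, List.map_map, Function.comp_def]
  apply List.map_congr_left
  intro t _
  congr 1
  unfold pvInner
  rw [List.filter_map, List.foldl_map]
  simp only [Function.comp_def]
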